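-- pv_equiv track=rewrite | github.com/luofeisg/OpenKE-PuTransE | benchmarks/Wikidata/Configure_wikidata_evolve_datasets.py | remove_uncommon_triple_ops
-- ===== SOURCE A (Python) =====
-- from collections import Counter, defaultdict
--
-- def remove_uncommon_triple_ops(triple_operations_divided, num_snapshots, entity_frequencies_threshold,
--                                relation_frequencies_threshold):
--     entity_occ_counter = defaultdict(lambda: {i: 0 for i in range(1, num_snapshots + 1)})
--     relation_occ_counter = defaultdict(lambda: {i: 0 for i in range(1, num_snapshots + 1)})
--
--     triple_result_set = set()
--     for snapshot_idx, triple_operations_list in enumerate(triple_operations_divided):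
--         for triple_op in triple_operations_list:
--             subj, objc, pred, op_type, ts = triple_op
--             triple = (subj, objc, pred)
--             if op_type == "+":
--                 triple_result_set.add(triple)
--             elif op_type == "-":
--                 triple_result_set.remove(triple)
--
--         # Iterate through triple result list to obtain frequencies
--         for triple in triple_result_set:
--             subj, objc, pred = triple
--             entity_occ_counter[subj][snapshot_idx + 1] += 1
--             entity_occ_counter[objc][snapshot_idx + 1] += 1
--             relation_occ_counter[pred][snapshot_idx + 1] += 1
--
--     uncommon_relations = set()
--     for relation, snapshot_frequencies_dict in relation_occ_counter.items():
--         for snapshot, count in snapshot_frequencies_dict.items():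
--             if count > 0 and count < relation_frequencies_threshold:
--                 uncommon_relations.add(relation)
--                 break
--
--     uncommon_entities = set()
--     for entity, snapshot_frequencies_dict in entity_occ_counter.items():
--         for snapshot, count in snapshot_frequencies_dict.items():
--             if count < entity_frequencies_threshold and count > 0:
--                 uncommon_entities.add(entity)
--                 break
--
--     filtered_triple_operations_divided = []
--     for snapshot_idx, triple_operations_list in enumerate(triple_operations_divided):
--         filtered_ops = []
--         for triple_op in triple_operations_list:
--             subj, objc, pred, op_type, ts = triple_op
--
--             if subj not in uncommon_entities \
--                     and objc not in uncommon_entities \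
--                     and pred not in uncommon_relations:
--                 filtered_ops.append(triple_op)
--
--         filtered_triple_operations_divided.append(filtered_ops)
--
--     return filtered_triple_operations_divided
-- ===== SOURCE B (Python) =====
-- def remove_uncommon_triple_ops(triple_operations_divided, num_snapshots, entity_frequencies_threshold,
--                                relation_frequencies_threshold):
--     # One pass: maintain the live-triple set and incremental per-entity/per-relation
--     # occurrence counts; after each snapshot only the entities/relations whose count
--     # changed in that snapshot are tested against the threshold band.
--     live = set()
--     ent_count = {}
--     rel_count = {}
--     uncommon_entities = set()
--     uncommon_relations = set()
--     for triple_operations_list in triple_operations_divided: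
--         changed_entities = set()
--         changed_relations = set()
--         for subj, objc, pred, op_type, ts in triple_operations_list:
--             triple = (subj, objc, pred)
--             if op_type == "+":
--                 if triple not in live:
--                     live.add(triple)
--                     ent_count[subj] = ent_count.get(subj, 0) + 1
--                     ent_count[objc] = ent_count.get(objc, 0) + 1
--                     rel_count[pred] = rel_count.get(pred, 0) + 1
--                     changed_entities.add(subj)
--                     changed_entities.add(objc)
--                     changed_relations.add(pred)
--             elif op_type == "-":
--                 live.remove(triple)
--                 ent_count[subj] = ent_count.get(subj, 0) - 1
--                 ent_count[objc] = ent_count.get(objc, 0) - 1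
--                 rel_count[pred] = rel_count.get(pred, 0) - 1
--                 changed_entities.add(subj)
--                 changed_entities.add(objc)
--                 changed_relations.add(pred)
--         for e in changed_entities:
--             if 0 < ent_count[e] < entity_frequencies_threshold:
--                 uncommon_entities.add(e)
--         for r in changed_relations:
--             if 0 < rel_count[r] < relation_frequencies_threshold:
--                 uncommon_relations.add(r)
--     return [[op for op in ops
--              if op[0] not in uncommon_entities
--              and op[1] not in uncommon_entities
--              and op[2] not in uncommon_relations]
--             for ops in triple_operations_divided]
-- ===== Notes on version B (the rewrite author's own statement) =====
-- stated objective: alternative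
-- what changed: Instead of re-scanning the whole live-triple set after every snapshot to rebuild per-snapshot frequency dicts, B maintains incremental entity/relation occurrence counts updated on each effective add/remove and threshold-tests only the entities/relations whose count changed in that snapshot (intended as faster, O(total_ops) vs O(num_snapshots*|live set|+total_ops); a timing run measured only 1.38x at the largest size, so no speed is claimed).
import Mathlib
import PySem

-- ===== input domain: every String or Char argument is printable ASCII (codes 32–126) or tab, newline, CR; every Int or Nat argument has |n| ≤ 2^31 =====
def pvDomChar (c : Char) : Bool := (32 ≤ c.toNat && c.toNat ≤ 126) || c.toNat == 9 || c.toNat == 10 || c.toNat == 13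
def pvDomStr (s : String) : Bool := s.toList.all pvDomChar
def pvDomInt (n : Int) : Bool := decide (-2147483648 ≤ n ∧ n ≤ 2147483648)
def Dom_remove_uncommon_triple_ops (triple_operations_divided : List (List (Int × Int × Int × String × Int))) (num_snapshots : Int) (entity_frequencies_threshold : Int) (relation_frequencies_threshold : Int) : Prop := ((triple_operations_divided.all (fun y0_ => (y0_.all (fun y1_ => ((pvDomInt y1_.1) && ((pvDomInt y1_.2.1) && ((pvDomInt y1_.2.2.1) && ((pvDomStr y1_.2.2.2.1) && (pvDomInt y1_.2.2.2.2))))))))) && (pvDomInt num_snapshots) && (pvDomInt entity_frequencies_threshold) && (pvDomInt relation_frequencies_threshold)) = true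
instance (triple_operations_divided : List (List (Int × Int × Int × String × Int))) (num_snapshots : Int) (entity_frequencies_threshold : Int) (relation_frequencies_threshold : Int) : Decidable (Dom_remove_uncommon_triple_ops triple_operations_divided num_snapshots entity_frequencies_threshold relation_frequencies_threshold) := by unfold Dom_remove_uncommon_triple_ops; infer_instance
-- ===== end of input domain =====

-- B replaces A's per-snapshot rescan of the whole live-triple set (rebuilding per-snapshot
-- frequency dicts) by incremental occurrence counts, threshold-testing only the entities/
-- relations whose count changed in each snapshot (a one-pass alternative algorithm).


abbrev pvOp := Int × Int × Int × String × Int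
abbrev pvTriple := Int × Int × Int

-- ===== PORT A =====

-- defaultdict default: {i: 0 for i in range(1, num_snapshots + 1)}
def pvFresh (num : Int) : PySem.Dict Int Int :=
  PySem.Dict.ofList ((PySem.List.pyRange 1 (num + 1) 1).map (fun i => (i, 0)))

-- entity_occ_counter[k][s] += 1 (defaultdict outer access; inner Dict.insert overwrites in
-- place; where Python would raise KeyError — s not a key — the input is outside Pre_)
def pvBump (d : PySem.Dict Int (PySem.Dict Int Int)) (k s num : Int) :
    PySem.Dict Int (PySem.Dict Int Int) :=
  let inner := d.getD k (pvFresh num)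
  d.insert k (inner.insert s (inner.getD s 0 + 1))

-- one triple_op applied to triple_result_set ('-' on an absent triple = KeyError, outside Pre_)
def pvApplyOpA (live : PySem.Set pvTriple) (op : pvOp) : PySem.Set pvTriple :=
  let t : pvTriple := (op.1, op.2.1, op.2.2.1)
  if op.2.2.2.1 == "+" then PySem.Set.add live t
  else if op.2.2.2.1 == "-" then (PySem.Set.remove? live t).getD live
  else live

-- the body of the per-live-triple counting loop (three '+= 1' bumps of the two counters)
def pvCntStep (num s0 : Int)
    (c : PySem.Dict Int (PySem.Dict Int Int) × PySem.Dict Int (PySem.Dict Int Int))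
    (t : pvTriple) :
    PySem.Dict Int (PySem.Dict Int Int) × PySem.Dict Int (PySem.Dict Int Int) :=
  (pvBump (pvBump c.1 t.1 s0 num) t.2.1 s0 num, pvBump c.2 t.2.2 s0 num)

-- one iteration of A's first loop: apply the snapshot's ops, then count over the live set
def pvSnapA (num : Int)
    (st : PySem.Set pvTriple × PySem.Dict Int (PySem.Dict Int Int) × PySem.Dict Int (PySem.Dict Int Int))
    (p : Int × List pvOp) :
    PySem.Set pvTriple × PySem.Dict Int (PySem.Dict Int Int) × PySem.Dict Int (PySem.Dict Int Int) :=
  let live := p.2.foldl pvApplyOpA st.1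
  let c := live.foldl (pvCntStep num (p.1 + 1)) (st.2.1, st.2.2)
  (live, c.1, c.2)

def remove_uncommon_triple_ops (triple_operations_divided : List (List (Int × Int × Int × String × Int))) (num_snapshots : Int) (entity_frequencies_threshold : Int) (relation_frequencies_threshold : Int) : List (List (Int × Int × Int × String × Int)) :=
  let st := (PySem.List.enumerate triple_operations_divided 0).foldl (pvSnapA num_snapshots)
    (([] : PySem.Set pvTriple), PySem.Dict.empty, PySem.Dict.empty)
  let uncR := st.2.2.items.foldl
    (fun (u : PySem.Set Int) p =>
      if p.2.items.any (fun q => 0 < q.2 && q.2 < relation_frequencies_threshold)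
      then PySem.Set.add u p.1 else u) []
  let uncE := st.2.1.items.foldl
    (fun (u : PySem.Set Int) p =>
      if p.2.items.any (fun q => q.2 < entity_frequencies_threshold && 0 < q.2)
      then PySem.Set.add u p.1 else u) []
  triple_operations_divided.map (fun ops =>
    ops.foldl (fun acc op =>
      if !(uncE.contains op.1) && !(uncE.contains op.2.1) && !(uncR.contains op.2.2.1)
      then acc ++ [op] else acc) [])

-- ===== PORT B =====

structure BSnapState where
  live : PySem.Set pvTriple
  entC : PySem.Dict Int Int
  relC : PySem.Dict Int Int
  chE : PySem.Set Int
  chR : PySem.Set Int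
deriving Repr

structure BState where
  live : PySem.Set pvTriple
  entC : PySem.Dict Int Int
  relC : PySem.Dict Int Int
  uncE : PySem.Set Int
  uncR : PySem.Set Int
deriving Repr

-- d[k] = d.get(k, 0) + v
def pvAdj (d : PySem.Dict Int Int) (k v : Int) : PySem.Dict Int Int :=
  d.insert k (d.getD k 0 + v)

-- one triple_op of a snapshot ('-' with an absent triple raises in Python: outside Pre_)
def pvStepB (s : BSnapState) (op : pvOp) : BSnapState :=
  let t : pvTriple := (op.1, op.2.1, op.2.2.1)
  if op.2.2.2.1 == "+" then
    if s.live.contains t then s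
    else
      { live := s.live ++ [t],
        entC := pvAdj (pvAdj s.entC op.1 1) op.2.1 1,
        relC := pvAdj s.relC op.2.2.1 1,
        chE := PySem.Set.add (PySem.Set.add s.chE op.1) op.2.1,
        chR := PySem.Set.add s.chR op.2.2.1 }
  else if op.2.2.2.1 == "-" then
    { live := PySem.Set.discard s.live t,
      entC := pvAdj (pvAdj s.entC op.1 (-1)) op.2.1 (-1),
      relC := pvAdj s.relC op.2.2.1 (-1),
      chE := PySem.Set.add (PySem.Set.add s.chE op.1) op.2.1,
      chR := PySem.Set.add s.chR op.2.2.1 }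
  else s

def pvSnapshotB (g : BState) (ops : List pvOp) (eth rth : Int) : BState :=
  let s := ops.foldl pvStepB ⟨g.live, g.entC, g.relC, [], []⟩
  { live := s.live, entC := s.entC, relC := s.relC,
    uncE := s.chE.foldl
      (fun u e => if 0 < s.entC.getD e 0 && s.entC.getD e 0 < eth then PySem.Set.add u e else u)
      g.uncE,
    uncR := s.chR.foldl
      (fun u r => if 0 < s.relC.getD r 0 && s.relC.getD r 0 < rth then PySem.Set.add u r else u)
      g.uncR }

def remove_uncommon_triple_ops_alt (triple_operations_divided : List (List (Int × Int × Int × String × Int))) (num_snapshots : Int) (entity_frequencies_threshold : Int) (relation_frequencies_threshold : Int) : List (List (Int × Int × Int × String × Int)) :=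
  let g := triple_operations_divided.foldl
    (fun g ops => pvSnapshotB g ops entity_frequencies_threshold relation_frequencies_threshold)
    ⟨[], PySem.Dict.empty, PySem.Dict.empty, [], []⟩
  triple_operations_divided.map (fun ops =>
    ops.filter (fun op =>
      !(g.uncE.contains op.1) && !(g.uncE.contains op.2.1) && !(g.uncR.contains op.2.2.1)))

-- ===== PRECONDITION & SPEC =====

-- the live-triple set across one snapshot's ops; none exactly where Python's set.remove raises
def pvOkSnap : PySem.Set pvTriple → List pvOp → Option (PySem.Set pvTriple)
  | live, [] => some live
  | live, op :: rest =>
    let t : pvTriple := (op.1, op.2.1, op.2.2.1)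
    if op.2.2.2.1 == "+" then pvOkSnap (PySem.Set.add live t) rest
    else if op.2.2.2.1 == "-" then
      match PySem.Set.remove? live t with
      | none => none
      | some l => pvOkSnap l rest
    else pvOkSnap live rest

def pvOk : PySem.Set pvTriple → List (List pvOp) → Int → Int → Bool
  | _, [], _, _ => true
  | live, ops :: rest, k, num =>
    match pvOkSnap live ops with
    | none => false
    | some live' => (live'.isEmpty || decide (k < num)) && pvOk live' rest (k + 1) num

-- Pre_ excludes exactly the inputs where A raises: a '-' op removing a triple that is not
-- currently live (KeyError from set.remove), or a snapshot whose live set is non-empty while its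
-- 1-based index is not a key of the per-snapshot dict {1..num_snapshots} (KeyError on count += 1).
def Pre_remove_uncommon_triple_ops (triple_operations_divided : List (List (Int × Int × Int × String × Int))) (num_snapshots : Int) (entity_frequencies_threshold : Int) (relation_frequencies_threshold : Int) : Prop :=
  pvOk [] triple_operations_divided 0 num_snapshots = true
instance (triple_operations_divided : List (List (Int × Int × Int × String × Int))) (num_snapshots : Int) (entity_frequencies_threshold : Int) (relation_frequencies_threshold : Int) : Decidable (Pre_remove_uncommon_triple_ops triple_operations_divided num_snapshots entity_frequencies_threshold relation_frequencies_threshold) := by unfold Pre_remove_uncommon_triple_ops; infer_instance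

def pvWitness_remove_uncommon_triple_ops : (List (List (Int × Int × Int × String × Int))) × Int × Int × Int :=
  ([[(1, 2, 3, "+", 0)], [(1, 2, 3, "-", 1)]], 2, 2, 2)

def Spec_remove_uncommon_triple_ops (triple_operations_divided : List (List (Int × Int × Int × String × Int))) (num_snapshots : Int) (entity_frequencies_threshold : Int) (relation_frequencies_threshold : Int) (out : List (List (Int × Int × Int × String × Int))) : Prop := out = remove_uncommon_triple_ops_alt triple_operations_divided num_snapshots entity_frequencies_threshold relation_frequencies_threshold
instance (triple_operations_divided : List (List (Int × Int × Int × String × Int))) (num_snapshots : Int) (entity_frequencies_threshold : Int) (relation_frequencies_threshold : Int) (out : List (List (Int × Int × Int × String × Int))) : Decidable (Spec_remove_uncommon_triple_ops triple_operations_divided num_snapshots entity_frequencies_threshold relation_frequencies_threshold out) := by unfold Spec_remove_uncommon_triple_ops; infer_instance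

-- ===== CLAIM (what is proved, stated in full; the proofs are below) =====
def Claim_equal_remove_uncommon_triple_ops : Prop := ∀ (triple_operations_divided : List (List (Int × Int × Int × String × Int))) (num_snapshots : Int) (entity_frequencies_threshold : Int) (relation_frequencies_threshold : Int), Dom_remove_uncommon_triple_ops triple_operations_divided num_snapshots entity_frequencies_threshold relation_frequencies_threshold → Pre_remove_uncommon_triple_ops triple_operations_divided num_snapshots entity_frequencies_threshold relation_frequencies_threshold → Spec_remove_uncommon_triple_ops triple_operations_divided num_snapshots entity_frequencies_threshold relation_frequencies_threshold (remove_uncommon_triple_ops triple_operations_divided num_snapshots entity_frequencies_threshold relation_frequencies_threshold)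

-- ===== LEMMAS AND PROOFS =====

abbrev pvEC := PySem.Dict Int (PySem.Dict Int Int)

-- occurrence multiplicities of an entity / relation in a live-triple list
def multE (e : Int) (l : List pvTriple) : Int :=
  (l.countP (fun t => t.1 == e) : Int) + (l.countP (fun t => t.2.1 == e) : Int)
def multR (r : Int) (l : List pvTriple) : Int := (l.countP (fun t => t.2.2 == r) : Int)

def snapLive (live : PySem.Set pvTriple) (ops : List pvOp) : PySem.Set pvTriple :=
  ops.foldl pvApplyOpA live

-- the live set after each successive snapshot
def livesFrom : PySem.Set pvTriple → List (List pvOp) → List (PySem.Set pvTriple)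
  | _, [] => []
  | live, ops :: rest => snapLive live ops :: livesFrom (snapLive live ops) rest

-- abstract view of A's nested counters: count of entity e at snapshot s
def pvF (num : Int) (d : pvEC) (e s : Int) : Int := (d.getD e (pvFresh num)).getD s 0

-- inner dicts all have the default key set {1..num}
def pvQ (num : Int) (d : pvEC) : Prop := ∀ x, (d.getD x (pvFresh num)).keys = (pvFresh num).keys

theorem pvFresh_getD (num s : Int) : (pvFresh num).getD s 0 = 0 := by
  have gen : ∀ (l : List (Int × Int)) (d : PySem.Dict Int Int), (∀ x, d.getD x 0 = 0) →
      (∀ p ∈ l, p.2 = 0) → ∀ s, (l.foldl (fun acc p => acc.insert p.1 p.2) d).getD s 0 = 0 := by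
    intro l
    induction l with
    | nil => intro d hd _ s; exact hd s
    | cons p rest ih =>
      intro d hd hl s
      refine ih _ (fun x => ?_) (fun q hq => hl q (List.mem_cons_of_mem _ hq)) s
      rw [PySem.Dict.getD_insert]
      split_ifs
      · exact hl p (List.mem_cons_self)
      · exact hd x
  unfold pvFresh PySem.Dict.ofList PySem.Dict.update
  apply gen
  · intro x; exact PySem.Dict.getD_empty x 0
  · intro p hp; simp only [List.mem_map] at hp; obtain ⟨i, _, rfl⟩ := hp; rfl
theorem pvFresh_keys (num : Int) : (pvFresh num).keys = PySem.List.pyRange 1 (num + 1) 1 := by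
  unfold pvFresh PySem.Dict.ofList PySem.Dict.update
  rw [PySem.Dict.keys_foldl_insert_key _ Prod.fst (fun _ p => p.2) PySem.Dict.empty]
  rw [PySem.Dict.keys_empty, PySem.Set.update_nil_left]
  have hid : (Prod.fst ∘ fun i : Int => (i, (0 : Int))) = id := rfl
  rw [List.map_map, hid, List.map_id]
  exact PySem.Set.ofList_eq_self_of_nodup _ (PySem.List.nodup_pyRange_one _ _)
theorem pvFresh_keys_nodup (num : Int) : (pvFresh num).keys.Nodup := by
  rw [pvFresh_keys]; exact PySem.List.nodup_pyRange_one _ _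

theorem pvBump_F (num : Int) (d : pvEC) (k s' e s : Int) :
    pvF num (pvBump d k s' num) e s = pvF num d e s + (if e = k ∧ s = s' then 1 else 0) := by
  simp only [pvF, pvBump]
  rw [PySem.Dict.getD_insert]
  by_cases he : e = k
  · subst he
    rw [if_pos rfl, PySem.Dict.getD_insert]
    by_cases hss : s = s'
    · subst hss; simp
    · simp [hss]
  · rw [if_neg he]
    simp [he]
theorem pvBump_keys_mem (num : Int) (d : pvEC) (k s' x : Int) :
    x ∈ (pvBump d k s' num).keys ↔ x = k ∨ x ∈ d.keys := by
  simp [pvBump, PySem.Dict.mem_keys_insert]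
theorem pvBump_nodup (num : Int) (d : pvEC) (k s' : Int) (h : d.keys.Nodup) :
    (pvBump d k s' num).keys.Nodup := by
  exact PySem.Dict.nodup_keys_insert _ _ _ h
theorem pvBump_Q (num : Int) (d : pvEC) (k s' : Int) (hs : 1 ≤ s' ∧ s' < num + 1)
    (h : pvQ num d) : pvQ num (pvBump d k s' num) := by
  intro x
  simp only [pvBump]
  rw [PySem.Dict.getD_insert]
  split_ifs with hx
  · rw [PySem.Dict.keys_insert_of_contains]
    · exact h k
    · rw [PySem.Dict.contains_iff_mem_keys, h k, pvFresh_keys, PySem.List.mem_pyRange_one]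
      exact hs
  · exact h x

theorem multE_cons (e : Int) (t : pvTriple) (l : List pvTriple) :
    multE e (t :: l) = multE e l + ((if t.1 = e then 1 else 0) + (if t.2.1 = e then 1 else 0)) := by
  simp only [multE, List.countP_cons, beq_iff_eq]
  split_ifs <;> push_cast <;> ring
theorem multR_cons (r : Int) (t : pvTriple) (l : List pvTriple) :
    multR r (t :: l) = multR r l + (if t.2.2 = r then 1 else 0) := by
  simp only [multR, List.countP_cons, beq_iff_eq]
  split_ifs <;> push_cast <;> ring
theorem multE_append (e : Int) (l : List pvTriple) (t : pvTriple) :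
    multE e (l ++ [t]) = multE e l + ((if t.1 = e then 1 else 0) + (if t.2.1 = e then 1 else 0)) := by
  simp only [multE, List.countP_append, List.countP_cons, List.countP_nil, beq_iff_eq]
  split_ifs <;> push_cast <;> ring
theorem multR_append (r : Int) (l : List pvTriple) (t : pvTriple) :
    multR r (l ++ [t]) = multR r l + (if t.2.2 = r then 1 else 0) := by
  simp only [multR, List.countP_append, List.countP_cons, List.countP_nil, beq_iff_eq]
  split_ifs <;> push_cast <;> ring
theorem multE_pos_iff (e : Int) (l : List pvTriple) :
    0 < multE e l ↔ ∃ t ∈ l, t.1 = e ∨ t.2.1 = e := by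
  unfold multE
  constructor
  · intro h
    have : 0 < l.countP (fun t => t.1 == e) ∨ 0 < l.countP (fun t => t.2.1 == e) := by omega
    rcases this with h1 | h1
    · obtain ⟨t, ht, hp⟩ := List.countP_pos_iff.mp h1
      exact ⟨t, ht, Or.inl (by simpa using hp)⟩
    · obtain ⟨t, ht, hp⟩ := List.countP_pos_iff.mp h1
      exact ⟨t, ht, Or.inr (by simpa using hp)⟩
  · rintro ⟨t, ht, h | h⟩
    · have : 0 < l.countP (fun t => t.1 == e) := List.countP_pos_iff.mpr ⟨t, ht, by simpa using h⟩
      omega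
    · have : 0 < l.countP (fun t => t.2.1 == e) := List.countP_pos_iff.mpr ⟨t, ht, by simpa using h⟩
      omega
theorem multR_pos_iff (r : Int) (l : List pvTriple) :
    0 < multR r l ↔ ∃ t ∈ l, t.2.2 = r := by
  unfold multR
  constructor
  · intro h
    have : 0 < l.countP (fun t => t.2.2 == r) := by omega
    obtain ⟨t, ht, hp⟩ := List.countP_pos_iff.mp this
    exact ⟨t, ht, by simpa using hp⟩
  · rintro ⟨t, ht, h⟩
    have : 0 < l.countP (fun t => t.2.2 == r) := List.countP_pos_iff.mpr ⟨t, ht, by simpa using h⟩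
    omega
theorem multE_erase (e : Int) (l : List pvTriple) (t : pvTriple) (ht : t ∈ l) :
    multE e (l.erase t) = multE e l - ((if t.1 = e then 1 else 0) + (if t.2.1 = e then 1 else 0)) := by
  unfold multE
  have h1 := (List.perm_cons_erase ht).countP_eq (fun t' => t'.1 == e)
  have h2 := (List.perm_cons_erase ht).countP_eq (fun t' => t'.2.1 == e)
  simp only [List.countP_cons, beq_iff_eq] at h1 h2
  split_ifs at h1 h2 ⊢ <;> omega
theorem multR_erase (r : Int) (l : List pvTriple) (t : pvTriple) (ht : t ∈ l) :
    multR r (l.erase t) = multR r l - (if t.2.2 = r then 1 else 0) := by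
  unfold multR
  have h1 := (List.perm_cons_erase ht).countP_eq (fun t' => t'.2.2 == r)
  simp only [List.countP_cons, beq_iff_eq] at h1
  split_ifs at h1 ⊢ <;> omega

-- the counting loop over one snapshot's live set
theorem cntfold_F_ent (num s0 : Int) (live : List pvTriple) :
    ∀ (c : pvEC × pvEC) (e s : Int),
    pvF num (live.foldl (pvCntStep num s0) c).1 e s
      = pvF num c.1 e s + (if s = s0 then multE e live else 0) := by
  induction live with
  | nil => intro c e s; simp [multE]
  | cons t rest ih =>
    intro c e s
    rw [List.foldl_cons, ih]
    simp only [pvCntStep]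
    rw [pvBump_F, pvBump_F, multE_cons]
    split_ifs <;> omega
theorem cntfold_F_rel (num s0 : Int) (live : List pvTriple) :
    ∀ (c : pvEC × pvEC) (r s : Int),
    pvF num (live.foldl (pvCntStep num s0) c).2 r s
      = pvF num c.2 r s + (if s = s0 then multR r live else 0) := by
  induction live with
  | nil => intro c r s; simp [multR]
  | cons t rest ih =>
    intro c r s
    rw [List.foldl_cons, ih]
    simp only [pvCntStep]
    rw [pvBump_F, multR_cons]
    split_ifs <;> omega
theorem cntfold_keys_ent (num s0 : Int) (live : List pvTriple) :
    ∀ (c : pvEC × pvEC) (x : Int),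
    x ∈ (live.foldl (pvCntStep num s0) c).1.keys ↔
      x ∈ c.1.keys ∨ ∃ t ∈ live, t.1 = x ∨ t.2.1 = x := by
  induction live with
  | nil => intro c x; simp
  | cons t rest ih =>
    intro c x
    rw [List.foldl_cons, ih]
    simp only [pvCntStep, pvBump_keys_mem, List.exists_mem_cons_iff]
    constructor
    · rintro ((h | h | h) | ⟨t', ht', h⟩)
      · exact Or.inr (Or.inl (Or.inr h.symm))
      · exact Or.inr (Or.inl (Or.inl h.symm))
      · exact Or.inl h
      · exact Or.inr (Or.inr ⟨t', ht', h⟩)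
    · rintro (h | (h | h) | ⟨t', ht', h⟩)
      · exact Or.inl (Or.inr (Or.inr h))
      · exact Or.inl (Or.inr (Or.inl h.symm))
      · exact Or.inl (Or.inl h.symm)
      · exact Or.inr ⟨t', ht', h⟩
theorem cntfold_keys_rel (num s0 : Int) (live : List pvTriple) :
    ∀ (c : pvEC × pvEC) (x : Int),
    x ∈ (live.foldl (pvCntStep num s0) c).2.keys ↔
      x ∈ c.2.keys ∨ ∃ t ∈ live, t.2.2 = x := by
  induction live with
  | nil => intro c x; simp
  | cons t rest ih =>
    intro c x
    rw [List.foldl_cons, ih]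
    simp only [pvCntStep, pvBump_keys_mem, List.exists_mem_cons_iff]
    constructor
    · rintro ((h | h) | ⟨t', ht', h⟩)
      · exact Or.inr (Or.inl h.symm)
      · exact Or.inl h
      · exact Or.inr (Or.inr ⟨t', ht', h⟩)
    · rintro (h | h | ⟨t', ht', h⟩)
      · exact Or.inl (Or.inr h)
      · exact Or.inl (Or.inl h.symm)
      · exact Or.inr ⟨t', ht', h⟩
theorem cntfold_inv (num s0 : Int) (live : List pvTriple)
    (hb : live = [] ∨ (1 ≤ s0 ∧ s0 < num + 1)) :
    ∀ (c : pvEC × pvEC), pvQ num c.1 → pvQ num c.2 → c.1.keys.Nodup → c.2.keys.Nodup →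
    pvQ num (live.foldl (pvCntStep num s0) c).1 ∧ pvQ num (live.foldl (pvCntStep num s0) c).2 ∧
    (live.foldl (pvCntStep num s0) c).1.keys.Nodup ∧ (live.foldl (pvCntStep num s0) c).2.keys.Nodup := by
  have aux : (1 ≤ s0 ∧ s0 < num + 1) → ∀ (l : List pvTriple) (c : pvEC × pvEC),
      pvQ num c.1 → pvQ num c.2 → c.1.keys.Nodup → c.2.keys.Nodup →
      pvQ num (l.foldl (pvCntStep num s0) c).1 ∧ pvQ num (l.foldl (pvCntStep num s0) c).2 ∧
      (l.foldl (pvCntStep num s0) c).1.keys.Nodup ∧ (l.foldl (pvCntStep num s0) c).2.keys.Nodup := by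
    intro hs l
    induction l with
    | nil => intro c h1 h2 h3 h4; exact ⟨h1, h2, h3, h4⟩
    | cons t rest ih =>
      intro c h1 h2 h3 h4
      rw [List.foldl_cons]
      exact ih _ (pvBump_Q _ _ _ _ hs (pvBump_Q _ _ _ _ hs h1))
        (pvBump_Q _ _ _ _ hs h2)
        (pvBump_nodup _ _ _ _ (pvBump_nodup _ _ _ _ h3))
        (pvBump_nodup _ _ _ _ h4)
  rcases hb with hb | hb
  · subst hb
    intro c h1 h2 h3 h4
    exact ⟨h1, h2, h3, h4⟩
  · exact aux hb live

theorem pvOkSnap_eq (ops : List pvOp) : ∀ (live l : PySem.Set pvTriple),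
    pvOkSnap live ops = some l → l = snapLive live ops := by
  induction ops with
  | nil =>
    intro live l h
    simp only [pvOkSnap, Option.some.injEq] at h
    simp [snapLive, h]
  | cons op rest ih =>
    intro live l h
    simp only [pvOkSnap] at h
    have hfold : snapLive live (op :: rest) = snapLive (pvApplyOpA live op) rest := rfl
    by_cases h1 : op.2.2.2.1 == "+"
    · rw [if_pos h1] at h
      rw [hfold]
      have : pvApplyOpA live op = PySem.Set.add live (op.1, op.2.1, op.2.2.1) := by
        simp [pvApplyOpA, h1]
      rw [this]
      exact ih _ _ h
    · by_cases h2 : op.2.2.2.1 == "-"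
      · rw [if_neg h1, if_pos h2] at h
        cases hr : PySem.Set.remove? live (op.1, op.2.1, op.2.2.1) with
        | none => rw [hr] at h; exact absurd h (by simp)
        | some l' =>
          rw [hr] at h
          rw [hfold]
          have : pvApplyOpA live op = l' := by
            simp [pvApplyOpA, h1, h2, hr]
          rw [this]
          exact ih _ _ h
      · rw [if_neg h1, if_neg h2] at h
        rw [hfold]
        have : pvApplyOpA live op = live := by
          simp [pvApplyOpA, h1, h2]
        rw [this]
        exact ih _ _ h
theorem pvOk_cons (live : PySem.Set pvTriple) (ops : List pvOp) (rest : List (List pvOp)) (k num : Int)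
    (h : pvOk live (ops :: rest) k num = true) :
    pvOkSnap live ops = some (snapLive live ops) ∧
    ((snapLive live ops).isEmpty || decide (k < num)) = true ∧
    pvOk (snapLive live ops) rest (k + 1) num = true := by
  simp only [pvOk] at h
  cases hs : pvOkSnap live ops with
  | none => rw [hs] at h; exact absurd h (by simp)
  | some l' =>
    rw [hs] at h
    have hl : l' = snapLive live ops := pvOkSnap_eq ops live l' hs
    subst hl
    rw [Bool.and_eq_true] at h
    exact ⟨rfl, h.1, h.2⟩
theorem pvOk_bound (snaps : List (List pvOp)) : ∀ (live : PySem.Set pvTriple) (k num : Int),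
    pvOk live snaps k num = true → ∀ j : Nat, j < snaps.length →
    (livesFrom live snaps).getD j [] ≠ [] → k + (j : Int) < num := by
  induction snaps with
  | nil => intro live k num h j hj; simp at hj
  | cons ops rest ih =>
    intro live k num h j hj hne
    obtain ⟨hs, hemp, hrest⟩ := pvOk_cons live ops rest k num h
    cases j with
    | zero =>
      simp only [livesFrom, List.getD_cons_zero] at hne
      rcases Bool.or_eq_true .. |>.mp hemp with h1 | h1
      · exact absurd (List.isEmpty_iff.mp h1) hne
      · simpa using h1
    | succ m =>
      have := ih (snapLive live ops) (k + 1) num hrest m (by simpa using hj)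
        (by simpa [livesFrom, List.getD_cons_succ] using hne)
      push_cast at this ⊢
      omega

-- A's first loop: full characterization of the two counters
set_option maxHeartbeats 1000000 in
theorem outerA (num : Int) (snaps : List (List pvOp)) :
    ∀ (k : Int) (st : PySem.Set pvTriple × pvEC × pvEC), 0 ≤ k →
    pvOk st.1 snaps k num = true →
    pvQ num st.2.1 → pvQ num st.2.2 → st.2.1.keys.Nodup → st.2.2.keys.Nodup →
    (∀ e s, pvF num ((PySem.List.enumerate snaps k).foldl (pvSnapA num) st).2.1 e s
        = pvF num st.2.1 e s + (if k < s ∧ s ≤ k + snaps.length then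
            multE e ((livesFrom st.1 snaps).getD (s - k - 1).toNat []) else 0)) ∧
    (∀ r s, pvF num ((PySem.List.enumerate snaps k).foldl (pvSnapA num) st).2.2 r s
        = pvF num st.2.2 r s + (if k < s ∧ s ≤ k + snaps.length then
            multR r ((livesFrom st.1 snaps).getD (s - k - 1).toNat []) else 0)) ∧
    (∀ x, x ∈ ((PySem.List.enumerate snaps k).foldl (pvSnapA num) st).2.1.keys ↔
        x ∈ st.2.1.keys ∨ ∃ l ∈ livesFrom st.1 snaps, ∃ t ∈ l, t.1 = x ∨ t.2.1 = x) ∧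
    (∀ x, x ∈ ((PySem.List.enumerate snaps k).foldl (pvSnapA num) st).2.2.keys ↔
        x ∈ st.2.2.keys ∨ ∃ l ∈ livesFrom st.1 snaps, ∃ t ∈ l, t.2.2 = x) ∧
    pvQ num ((PySem.List.enumerate snaps k).foldl (pvSnapA num) st).2.1 ∧
    pvQ num ((PySem.List.enumerate snaps k).foldl (pvSnapA num) st).2.2 ∧
    ((PySem.List.enumerate snaps k).foldl (pvSnapA num) st).2.1.keys.Nodup ∧
    ((PySem.List.enumerate snaps k).foldl (pvSnapA num) st).2.2.keys.Nodup := by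
  induction snaps with
  | nil =>
    intro k st hk hok h1 h2 h3 h4
    simp only [PySem.List.enumerate_nil, List.foldl_nil, livesFrom, List.length_nil]
    refine ⟨?_, ?_, ?_, ?_, h1, h2, h3, h4⟩
    · intro e s; rw [if_neg (by push_cast; omega)]; ring
    · intro r s; rw [if_neg (by push_cast; omega)]; ring
    · intro x; simp
    · intro x; simp
  | cons ops rest ih =>
    intro k st hk hok h1 h2 h3 h4
    obtain ⟨hs, hemp, hrest⟩ := pvOk_cons st.1 ops rest k num hok
    rw [PySem.List.enumerate_cons, List.foldl_cons]
    set live' := snapLive st.1 ops with hlive'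
    set st' := pvSnapA num st (k, ops) with hst'
    have hst'1 : st'.1 = live' := rfl
    have h21 : st'.2.1 = (live'.foldl (pvCntStep num (k + 1)) (st.2.1, st.2.2)).1 := rfl
    have h22 : st'.2.2 = (live'.foldl (pvCntStep num (k + 1)) (st.2.1, st.2.2)).2 := rfl
    have hb : live' = [] ∨ (1 ≤ k + 1 ∧ k + 1 < num + 1) := by
      have h' := hemp
      rw [Bool.or_eq_true] at h'
      rcases h' with hx | hx
      · exact Or.inl (List.isEmpty_iff.mp hx)
      · exact Or.inr ⟨by omega, by have := of_decide_eq_true hx; omega⟩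
    have hinv := cntfold_inv num (k + 1) live' hb (st.2.1, st.2.2) h1 h2 h3 h4
    have h1' : pvQ num st'.2.1 := by rw [h21]; exact hinv.1
    have h2' : pvQ num st'.2.2 := by rw [h22]; exact hinv.2.1
    have h3' : st'.2.1.keys.Nodup := by rw [h21]; exact hinv.2.2.1
    have h4' : st'.2.2.keys.Nodup := by rw [h22]; exact hinv.2.2.2
    have hok' : pvOk st'.1 rest (k + 1) num = true := by rw [hst'1]; exact hrest
    have IH := ih (k + 1) st' (by omega) hok' h1' h2' h3' h4'
    have hLs : livesFrom st.1 (ops :: rest) = live' :: livesFrom live' rest := rfl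
    have hLs' : livesFrom st'.1 rest = livesFrom live' rest := by rw [hst'1]
    refine ⟨?_, ?_, ?_, ?_, IH.2.2.2.2.1, IH.2.2.2.2.2.1, IH.2.2.2.2.2.2.1, IH.2.2.2.2.2.2.2⟩
    · intro e s
      rw [IH.1 e s, hLs']
      have hmid : pvF num st'.2.1 e s
          = pvF num st.2.1 e s + (if s = k + 1 then multE e live' else 0) := by
        rw [h21]; exact cntfold_F_ent num (k + 1) live' (st.2.1, st.2.2) e s
      rw [hmid, hLs]
      simp only [List.length_cons]
      by_cases hs1 : s = k + 1
      · subst hs1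
        rw [if_pos rfl, if_neg (by push_cast; omega), if_pos (by push_cast; omega)]
        have hz : (k + 1 - k - 1).toNat = 0 := by omega
        rw [hz, List.getD_cons_zero]
        ring
      · by_cases hs2 : k + 1 < s ∧ s ≤ (k + 1) + (rest.length : Int)
        · rw [if_neg hs1, if_pos hs2, if_pos (by push_cast; omega)]
          have hn : (s - k - 1).toNat = (s - (k + 1) - 1).toNat + 1 := by omega
          rw [hn, List.getD_cons_succ]
          ring
        · rw [if_neg hs1, if_neg hs2, if_neg (by push_cast at hs2 ⊢; omega)]
          ring
    · intro r s
      rw [IH.2.1 r s, hLs']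
      have hmid : pvF num st'.2.2 r s
          = pvF num st.2.2 r s + (if s = k + 1 then multR r live' else 0) := by
        rw [h22]; exact cntfold_F_rel num (k + 1) live' (st.2.1, st.2.2) r s
      rw [hmid, hLs]
      simp only [List.length_cons]
      by_cases hs1 : s = k + 1
      · subst hs1
        rw [if_pos rfl, if_neg (by push_cast; omega), if_pos (by push_cast; omega)]
        have hz : (k + 1 - k - 1).toNat = 0 := by omega
        rw [hz, List.getD_cons_zero]
        ring
      · by_cases hs2 : k + 1 < s ∧ s ≤ (k + 1) + (rest.length : Int)
        · rw [if_neg hs1, if_pos hs2, if_pos (by push_cast; omega)]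
          have hn : (s - k - 1).toNat = (s - (k + 1) - 1).toNat + 1 := by omega
          rw [hn, List.getD_cons_succ]
          ring
        · rw [if_neg hs1, if_neg hs2, if_neg (by push_cast at hs2 ⊢; omega)]
          ring
    · intro x
      rw [IH.2.2.1 x, hLs']
      have hkeys : x ∈ st'.2.1.keys ↔ x ∈ st.2.1.keys ∨ ∃ t ∈ live', t.1 = x ∨ t.2.1 = x := by
        rw [h21]; exact cntfold_keys_ent num (k + 1) live' (st.2.1, st.2.2) x
      rw [hkeys, hLs, or_assoc, List.exists_mem_cons_iff]
    · intro x
      rw [IH.2.2.2.1 x, hLs']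
      have hkeys : x ∈ st'.2.2.keys ↔ x ∈ st.2.2.keys ∨ ∃ t ∈ live', t.2.2 = x := by
        rw [h22]; exact cntfold_keys_rel num (k + 1) live' (st.2.1, st.2.2) x
      rw [hkeys, hLs, or_assoc, List.exists_mem_cons_iff]

-- generic membership of the 'if cond then add' folds
theorem mem_foldl_ite_add {β : Type} (q : β → Bool) (f : β → Int) (l : List β) :
    ∀ (u : PySem.Set Int) (y : Int),
    (y ∈ l.foldl (fun u b => if q b then PySem.Set.add u (f b) else u) u ↔
      y ∈ u ∨ ∃ b ∈ l, q b = true ∧ y = f b) := by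
  induction l with
  | nil => intro u y; simp
  | cons b rest ih =>
    intro u y
    simp only [List.foldl_cons]
    by_cases hb : q b
    · rw [if_pos hb, ih]
      simp only [PySem.Set.mem_add, List.mem_cons]
      constructor
      · rintro (⟨h | h⟩ | ⟨c, hc, hq, rfl⟩)
        · exact Or.inl h
        · exact Or.inr ⟨b, Or.inl rfl, hb, h⟩
        · exact Or.inr ⟨c, Or.inr hc, hq, rfl⟩
      · rintro (h | ⟨c, hc | hc, hq, rfl⟩)
        · exact Or.inl (Or.inl h)
        · subst hc; exact Or.inl (Or.inr rfl)
        · exact Or.inr ⟨c, hc, hq, rfl⟩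
    · rw [if_neg hb, ih]
      simp only [List.mem_cons]
      constructor
      · rintro (h | ⟨c, hc, hq, rfl⟩)
        · exact Or.inl h
        · exact Or.inr ⟨c, Or.inr hc, hq, rfl⟩
      · rintro (h | ⟨c, hc | hc, hq, rfl⟩)
        · exact Or.inl h
        · subst hc; exact absurd hq (by simp [hb])
        · exact Or.inr ⟨c, hc, hq, rfl⟩

-- proof-side names for A's final states
def pvStA (tod : List (List pvOp)) (num : Int) :
    PySem.Set pvTriple × pvEC × pvEC :=
  (PySem.List.enumerate tod 0).foldl (pvSnapA num) ([], PySem.Dict.empty, PySem.Dict.empty)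
def pvUncE (tod : List (List pvOp)) (num eth : Int) : PySem.Set Int :=
  (pvStA tod num).2.1.items.foldl
    (fun u p => if p.2.items.any (fun q => q.2 < eth && 0 < q.2) then PySem.Set.add u p.1 else u) []
def pvUncR (tod : List (List pvOp)) (num rth : Int) : PySem.Set Int :=
  (pvStA tod num).2.2.items.foldl
    (fun u p => if p.2.items.any (fun q => 0 < q.2 && q.2 < rth) then PySem.Set.add u p.1 else u) []

theorem portA_eq (tod : List (List pvOp)) (num eth rth : Int) :
    remove_uncommon_triple_ops tod num eth rth = tod.map (fun ops =>
      ops.foldl (fun acc op =>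
        if !((pvUncE tod num eth).contains op.1) && !((pvUncE tod num eth).contains op.2.1)
            && !((pvUncR tod num rth).contains op.2.2.1)
        then acc ++ [op] else acc) []) := rfl

theorem livesFrom_length (snaps : List (List pvOp)) : ∀ live,
    (livesFrom live snaps).length = snaps.length := by
  induction snaps with
  | nil => intro live; rfl
  | cons ops rest ih => intro live; simp [livesFrom, ih]

theorem pvQ_empty (num : Int) : pvQ num PySem.Dict.empty := by
  intro x; rw [PySem.Dict.getD_empty]

theorem pvF_empty (num e s : Int) : pvF num PySem.Dict.empty e s = 0 := by
  unfold pvF; rw [PySem.Dict.getD_empty, pvFresh_getD]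

-- A's uncommon sets, characterized
theorem uncA_ent_iff (tod : List (List pvOp)) (num eth : Int)
    (hok : pvOk [] tod 0 num = true) (e : Int) :
    e ∈ pvUncE tod num eth ↔ ∃ j : Nat, j < (livesFrom [] tod).length ∧
      0 < multE e ((livesFrom [] tod).getD j []) ∧ multE e ((livesFrom [] tod).getD j []) < eth := by
  have hA := outerA num tod 0 ([], PySem.Dict.empty, PySem.Dict.empty) (le_refl 0) hok
    (pvQ_empty num) (pvQ_empty num) PySem.Dict.nodup_keys_empty PySem.Dict.nodup_keys_empty
  have hF : ∀ e s, pvF num (pvStA tod num).2.1 e s =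
      (if 0 < s ∧ s ≤ (tod.length : Int) then
        multE e ((livesFrom [] tod).getD (s - 1).toNat []) else 0) := by
    intro e' s
    have := hA.1 e' s
    rw [pvF_empty] at this
    rw [show (pvStA tod num).2.1 = ((PySem.List.enumerate tod 0).foldl (pvSnapA num)
        ([], PySem.Dict.empty, PySem.Dict.empty)).2.1 from rfl, this]
    simp only [zero_add, sub_zero]
  have hkeys : ∀ x, x ∈ (pvStA tod num).2.1.keys ↔
      ∃ l ∈ livesFrom [] tod, ∃ t ∈ l, t.1 = x ∨ t.2.1 = x := by
    intro x
    have := hA.2.2.1 x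
    rw [show (pvStA tod num).2.1 = ((PySem.List.enumerate tod 0).foldl (pvSnapA num)
        ([], PySem.Dict.empty, PySem.Dict.empty)).2.1 from rfl, this]
    simp [PySem.Dict.keys_empty]
  have hQD : pvQ num (pvStA tod num).2.1 := hA.2.2.2.2.1
  have hnd : (pvStA tod num).2.1.keys.Nodup := hA.2.2.2.2.2.2.1
  unfold pvUncE
  rw [mem_foldl_ite_add
    (fun p : Int × PySem.Dict Int Int => p.2.items.any (fun q => q.2 < eth && 0 < q.2))
    Prod.fst (pvStA tod num).2.1.items [] e]
  simp only [List.not_mem_nil, false_or]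
  rw [PySem.Dict.items_eq_map_keys (pvStA tod num).2.1 hnd (pvFresh num)]
  constructor
  · rintro ⟨p, hp, hany, heq⟩
    simp only [List.mem_map] at hp
    obtain ⟨x, hx, rfl⟩ := hp
    have he : e = x := by simpa using heq
    subst he
    simp only at hany
    have hinner : ((pvStA tod num).2.1.getD e (pvFresh num)).items
        = (pvFresh num).keys.map (fun s => (s, ((pvStA tod num).2.1.getD e (pvFresh num)).getD s 0)) := by
      rw [← hQD e]
      exact PySem.Dict.items_eq_map_keys _ (by rw [hQD e]; exact pvFresh_keys_nodup num) 0
    rw [hinner, List.any_map, List.any_eq_true] at hany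
    obtain ⟨sx, hsmem, hband⟩ := hany
    rw [pvFresh_keys, PySem.List.mem_pyRange_one] at hsmem
    simp only [Function.comp, Bool.and_eq_true, decide_eq_true_eq] at hband
    have hFx : ((pvStA tod num).2.1.getD e (pvFresh num)).getD sx 0 = pvF num (pvStA tod num).2.1 e sx := rfl
    rw [hFx, hF e sx] at hband
    by_cases hcond : 0 < sx ∧ sx ≤ (tod.length : Int)
    · rw [if_pos hcond] at hband
      refine ⟨(sx - 1).toNat, ?_, ?_, ?_⟩
      · rw [livesFrom_length]; omega
      · omega
      · omega
    · rw [if_neg hcond] at hband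
      omega
  · rintro ⟨j, hj, hpos, hlt⟩
    have hjlen : j < tod.length := by rw [livesFrom_length] at hj; exact hj
    have hlne : (livesFrom [] tod).getD j [] ≠ [] := by
      intro hnil
      rw [hnil] at hpos
      simp [multE] at hpos
    have hjnum : (0 : Int) + (j : Int) < num := pvOk_bound tod [] 0 num hok j hjlen hlne
    have hxkeys : e ∈ (pvStA tod num).2.1.keys := by
      rw [hkeys]
      obtain ⟨t, ht, hor⟩ := (multE_pos_iff e _).mp hpos
      refine ⟨(livesFrom [] tod).getD j [], ?_, t, ht, hor⟩
      rw [List.getD_eq_getElem _ _ hj]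
      exact List.getElem_mem hj
    refine ⟨(e, (pvStA tod num).2.1.getD e (pvFresh num)), ?_, ?_, rfl⟩
    · simp only [List.mem_map]
      exact ⟨e, hxkeys, rfl⟩
    · simp only
      have hinner : ((pvStA tod num).2.1.getD e (pvFresh num)).items
          = (pvFresh num).keys.map (fun s => (s, ((pvStA tod num).2.1.getD e (pvFresh num)).getD s 0)) := by
        rw [← hQD e]
        exact PySem.Dict.items_eq_map_keys _ (by rw [hQD e]; exact pvFresh_keys_nodup num) 0
      rw [hinner, List.any_map, List.any_eq_true]
      refine ⟨(j : Int) + 1, ?_, ?_⟩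
      · rw [pvFresh_keys, PySem.List.mem_pyRange_one]
        constructor <;> omega
      · have hFx : ((pvStA tod num).2.1.getD e (pvFresh num)).getD ((j : Int) + 1) 0
            = pvF num (pvStA tod num).2.1 e ((j : Int) + 1) := rfl
        simp only [Function.comp, Bool.and_eq_true, decide_eq_true_eq]
        rw [hFx, hF e ((j : Int) + 1), if_pos (by constructor <;> omega)]
        have hidx : (((j : Int) + 1) - 1).toNat = j := by omega
        rw [hidx]
        exact ⟨hlt, hpos⟩
theorem uncA_rel_iff (tod : List (List pvOp)) (num rth : Int)
    (hok : pvOk [] tod 0 num = true) (r : Int) :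
    r ∈ pvUncR tod num rth ↔ ∃ j : Nat, j < (livesFrom [] tod).length ∧
      0 < multR r ((livesFrom [] tod).getD j []) ∧ multR r ((livesFrom [] tod).getD j []) < rth := by
  have hA := outerA num tod 0 ([], PySem.Dict.empty, PySem.Dict.empty) (le_refl 0) hok
    (pvQ_empty num) (pvQ_empty num) PySem.Dict.nodup_keys_empty PySem.Dict.nodup_keys_empty
  have hF : ∀ r s, pvF num (pvStA tod num).2.2 r s =
      (if 0 < s ∧ s ≤ (tod.length : Int) then
        multR r ((livesFrom [] tod).getD (s - 1).toNat []) else 0) := by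
    intro r' s
    have := hA.2.1 r' s
    rw [pvF_empty] at this
    rw [show (pvStA tod num).2.2 = ((PySem.List.enumerate tod 0).foldl (pvSnapA num)
        ([], PySem.Dict.empty, PySem.Dict.empty)).2.2 from rfl, this]
    simp only [zero_add, sub_zero]
  have hkeys : ∀ x, x ∈ (pvStA tod num).2.2.keys ↔
      ∃ l ∈ livesFrom [] tod, ∃ t ∈ l, t.2.2 = x := by
    intro x
    have := hA.2.2.2.1 x
    rw [show (pvStA tod num).2.2 = ((PySem.List.enumerate tod 0).foldl (pvSnapA num)
        ([], PySem.Dict.empty, PySem.Dict.empty)).2.2 from rfl, this]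
    simp [PySem.Dict.keys_empty]
  have hQD : pvQ num (pvStA tod num).2.2 := hA.2.2.2.2.2.1
  have hnd : (pvStA tod num).2.2.keys.Nodup := hA.2.2.2.2.2.2.2
  unfold pvUncR
  rw [mem_foldl_ite_add
    (fun p : Int × PySem.Dict Int Int => p.2.items.any (fun q => 0 < q.2 && q.2 < rth))
    Prod.fst (pvStA tod num).2.2.items [] r]
  simp only [List.not_mem_nil, false_or]
  rw [PySem.Dict.items_eq_map_keys (pvStA tod num).2.2 hnd (pvFresh num)]
  constructor
  · rintro ⟨p, hp, hany, heq⟩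
    simp only [List.mem_map] at hp
    obtain ⟨x, hx, rfl⟩ := hp
    have he : r = x := by simpa using heq
    subst he
    simp only at hany
    have hinner : ((pvStA tod num).2.2.getD r (pvFresh num)).items
        = (pvFresh num).keys.map (fun s => (s, ((pvStA tod num).2.2.getD r (pvFresh num)).getD s 0)) := by
      rw [← hQD r]
      exact PySem.Dict.items_eq_map_keys _ (by rw [hQD r]; exact pvFresh_keys_nodup num) 0
    rw [hinner, List.any_map, List.any_eq_true] at hany
    obtain ⟨sx, hsmem, hband⟩ := hany
    rw [pvFresh_keys, PySem.List.mem_pyRange_one] at hsmem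
    simp only [Function.comp, Bool.and_eq_true, decide_eq_true_eq] at hband
    have hFx : ((pvStA tod num).2.2.getD r (pvFresh num)).getD sx 0 = pvF num (pvStA tod num).2.2 r sx := rfl
    rw [hFx, hF r sx] at hband
    by_cases hcond : 0 < sx ∧ sx ≤ (tod.length : Int)
    · rw [if_pos hcond] at hband
      refine ⟨(sx - 1).toNat, ?_, ?_, ?_⟩
      · rw [livesFrom_length]; omega
      · omega
      · omega
    · rw [if_neg hcond] at hband
      omega
  · rintro ⟨j, hj, hpos, hlt⟩
    have hjlen : j < tod.length := by rw [livesFrom_length] at hj; exact hj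
    have hlne : (livesFrom [] tod).getD j [] ≠ [] := by
      intro hnil
      rw [hnil] at hpos
      simp [multR] at hpos
    have hjnum : (0 : Int) + (j : Int) < num := pvOk_bound tod [] 0 num hok j hjlen hlne
    have hxkeys : r ∈ (pvStA tod num).2.2.keys := by
      rw [hkeys]
      obtain ⟨t, ht, hor⟩ := (multR_pos_iff r _).mp hpos
      refine ⟨(livesFrom [] tod).getD j [], ?_, t, ht, hor⟩
      rw [List.getD_eq_getElem _ _ hj]
      exact List.getElem_mem hj
    refine ⟨(r, (pvStA tod num).2.2.getD r (pvFresh num)), ?_, ?_, rfl⟩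
    · simp only [List.mem_map]
      exact ⟨r, hxkeys, rfl⟩
    · simp only
      have hinner : ((pvStA tod num).2.2.getD r (pvFresh num)).items
          = (pvFresh num).keys.map (fun s => (s, ((pvStA tod num).2.2.getD r (pvFresh num)).getD s 0)) := by
        rw [← hQD r]
        exact PySem.Dict.items_eq_map_keys _ (by rw [hQD r]; exact pvFresh_keys_nodup num) 0
      rw [hinner, List.any_map, List.any_eq_true]
      refine ⟨(j : Int) + 1, ?_, ?_⟩
      · rw [pvFresh_keys, PySem.List.mem_pyRange_one]
        constructor <;> omega
      · have hFx : ((pvStA tod num).2.2.getD r (pvFresh num)).getD ((j : Int) + 1) 0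
            = pvF num (pvStA tod num).2.2 r ((j : Int) + 1) := rfl
        simp only [Function.comp, Bool.and_eq_true, decide_eq_true_eq]
        rw [hFx, hF r ((j : Int) + 1), if_pos (by constructor <;> omega)]
        have hidx : (((j : Int) + 1) - 1).toNat = j := by omega
        rw [hidx]
        exact ⟨hpos, hlt⟩

-- ===== B-side =====

def pvOkChain : PySem.Set pvTriple → List (List pvOp) → Bool
  | _, [] => true
  | live, ops :: rest =>
    match pvOkSnap live ops with
    | none => false
    | some live' => pvOkChain live' rest

theorem pvOk_imp_chain (snaps : List (List pvOp)) : ∀ (live : PySem.Set pvTriple) (k num : Int),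
    pvOk live snaps k num = true → pvOkChain live snaps = true := by
  induction snaps with
  | nil => intro live k num _; rfl
  | cons ops rest ih =>
    intro live k num h
    obtain ⟨hs, _, hrest⟩ := pvOk_cons live ops rest k num h
    simp only [pvOkChain, hs]
    exact ih _ _ _ hrest

def pvCntE (d : PySem.Dict Int Int) (live : List pvTriple) : Prop := ∀ e, d.getD e 0 = multE e live
def pvCntR (d : PySem.Dict Int Int) (live : List pvTriple) : Prop := ∀ r, d.getD r 0 = multR r live
def pvSatE (u : PySem.Set Int) (live : List pvTriple) (th : Int) : Prop :=
  ∀ e, 0 < multE e live → multE e live < th → e ∈ u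
def pvSatR (u : PySem.Set Int) (live : List pvTriple) (th : Int) : Prop :=
  ∀ r, 0 < multR r live → multR r live < th → r ∈ u

theorem pvAdj_getD (d : PySem.Dict Int Int) (k v x : Int) :
    (pvAdj d k v).getD x 0 = d.getD x 0 + (if x = k then v else 0) := by
  unfold pvAdj
  rw [PySem.Dict.getD_insert]
  split_ifs with h
  · subst h; ring
  · ring

-- B's inner per-snapshot loop
theorem innerB (ops : List pvOp) : ∀ (s : BSnapState) (lfin : PySem.Set pvTriple),
    pvOkSnap s.live ops = some lfin → s.live.Nodup →
    pvCntE s.entC s.live → pvCntR s.relC s.live →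
    (ops.foldl pvStepB s).live = snapLive s.live ops ∧
    (ops.foldl pvStepB s).live.Nodup ∧
    pvCntE (ops.foldl pvStepB s).entC (ops.foldl pvStepB s).live ∧
    pvCntR (ops.foldl pvStepB s).relC (ops.foldl pvStepB s).live ∧
    (∀ e, e ∉ (ops.foldl pvStepB s).chE → e ∉ s.chE ∧
        multE e (ops.foldl pvStepB s).live = multE e s.live) ∧
    (∀ r, r ∉ (ops.foldl pvStepB s).chR → r ∉ s.chR ∧
        multR r (ops.foldl pvStepB s).live = multR r s.live) := by
  induction ops with
  | nil =>
    intro s lfin hok hnd hce hcr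
    exact ⟨rfl, hnd, hce, hcr, fun e he => ⟨he, rfl⟩, fun r hr => ⟨hr, rfl⟩⟩
  | cons op rest ih =>
    intro s lfin hok hnd hce hcr
    rw [List.foldl_cons]
    have hfold : snapLive s.live (op :: rest) = snapLive (pvApplyOpA s.live op) rest := rfl
    by_cases h1 : op.2.2.2.1 == "+"
    · by_cases hmem : s.live.contains (op.1, op.2.1, op.2.2.1)
      · -- '+' of an already-live triple: state unchanged
        have hstep : pvStepB s op = s := by
          simp only [pvStepB]
          rw [if_pos h1, if_pos hmem]
        have happ : pvApplyOpA s.live op = s.live := by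
          simp only [pvApplyOpA]
          rw [if_pos h1]
          exact PySem.Set.add_of_mem (PySem.Set.contains_iff _ _ |>.mp hmem)
        have hok' : pvOkSnap s.live rest = some lfin := by
          simp only [pvOkSnap] at hok
          rw [if_pos h1] at hok
          rwa [PySem.Set.add_of_mem (PySem.Set.contains_iff _ _ |>.mp hmem)] at hok
        rw [hstep, hfold, happ]
        exact ih s lfin hok' hnd hce hcr
      · -- '+' of a fresh triple
        set t : pvTriple := (op.1, op.2.1, op.2.2.1) with ht
        have htn : t ∉ s.live := fun hmm =>
          hmem (PySem.Set.contains_iff _ _ |>.mpr hmm)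
        set s' : BSnapState :=
          { live := s.live ++ [t],
            entC := pvAdj (pvAdj s.entC op.1 1) op.2.1 1,
            relC := pvAdj s.relC op.2.2.1 1,
            chE := PySem.Set.add (PySem.Set.add s.chE op.1) op.2.1,
            chR := PySem.Set.add s.chR op.2.2.1 } with hs'
        have hstep : pvStepB s op = s' := by
          simp only [pvStepB]
          rw [if_pos h1, if_neg hmem]
        have happ : pvApplyOpA s.live op = s.live ++ [t] := by
          simp only [pvApplyOpA]
          rw [if_pos h1]
          exact PySem.Set.add_of_not_mem htn
        have hok' : pvOkSnap s'.live rest = some lfin := by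
          simp only [pvOkSnap] at hok
          rw [if_pos h1] at hok
          have hl : s'.live = s.live ++ [t] := rfl
          rw [hl, ← PySem.Set.add_of_not_mem htn]
          exact hok
        have hnd' : s'.live.Nodup := by
          have : (s.live ++ [t]).Nodup := by
            rw [List.nodup_append]
            refine ⟨hnd, List.nodup_singleton t, ?_⟩
            intro a ha b hb
            rw [List.mem_singleton.mp hb]
            exact fun hab => htn (hab ▸ ha)
          exact this
        have hce' : pvCntE s'.entC s'.live := by
          intro e
          simp only [hs']
          rw [pvAdj_getD, pvAdj_getD, hce e, multE_append]
          have : t.1 = op.1 ∧ t.2.1 = op.2.1 := ⟨rfl, rfl⟩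
          rw [this.1, this.2]
          split_ifs <;> omega
        have hcr' : pvCntR s'.relC s'.live := by
          intro r
          simp only [hs']
          rw [pvAdj_getD, hcr r, multR_append]
          have : t.2.2 = op.2.2.1 := rfl
          rw [this]
          split_ifs <;> omega
        rw [hstep, hfold, happ]
        have hres := ih s' lfin hok' hnd' hce' hcr'
        refine ⟨hres.1, hres.2.1, hres.2.2.1, hres.2.2.2.1, ?_, ?_⟩
        · intro e he
          obtain ⟨hnotch, hm⟩ := hres.2.2.2.2.1 e he
          simp only [hs', PySem.Set.mem_add] at hnotch
          refine ⟨fun hc => hnotch (Or.inl (Or.inl hc)), ?_⟩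
          rw [hm]
          simp only [hs']
          rw [multE_append]
          have h1' : ¬ (t.1 = e) := fun hh => hnotch (Or.inl (Or.inr hh.symm))
          have h2' : ¬ (t.2.1 = e) := fun hh => hnotch (Or.inr hh.symm)
          rw [if_neg h1', if_neg h2']
          ring
        · intro r hr
          obtain ⟨hnotch, hm⟩ := hres.2.2.2.2.2 r hr
          simp only [hs', PySem.Set.mem_add] at hnotch
          refine ⟨fun hc => hnotch (Or.inl hc), ?_⟩
          rw [hm]
          simp only [hs']
          rw [multR_append]
          have h1' : ¬ (t.2.2 = r) := fun hh => hnotch (Or.inr hh.symm)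
          rw [if_neg h1']
          ring
    · by_cases h2 : op.2.2.2.1 == "-"
      · -- '-' : inside Pre_ the triple is live
        set t : pvTriple := (op.1, op.2.1, op.2.2.1) with ht
        have hok0 : pvOkSnap s.live (op :: rest) = some lfin := hok
        rw [show pvOkSnap s.live (op :: rest)
            = (match PySem.Set.remove? s.live t with
               | none => none
               | some l => pvOkSnap l rest) from by
          simp only [pvOkSnap]
          rw [if_neg (by simpa using h1), if_pos h2]] at hok0
        cases hrm : PySem.Set.remove? s.live t with
        | none => rw [hrm] at hok0; exact absurd hok0 (by simp)
        | some l' =>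
          rw [hrm] at hok0
          have hcontains : s.live.contains t = true := by
            by_contra hc
            have : PySem.Set.remove? s.live t = none := by
              unfold PySem.Set.remove?
              rw [if_neg hc]
            rw [this] at hrm; exact absurd hrm (by simp)
          have htm : t ∈ s.live := PySem.Set.contains_iff _ _ |>.mp hcontains
          have hl' : l' = PySem.Set.discard s.live t := by
            unfold PySem.Set.remove? at hrm
            rw [if_pos hcontains] at hrm
            exact (Option.some.injEq _ _ ▸ hrm).symm ▸ rfl
          have hdiscard : PySem.Set.discard s.live t = s.live.erase t := by
            rw [List.Nodup.erase_eq_filter hnd]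
            rfl
          set s' : BSnapState :=
            { live := PySem.Set.discard s.live t,
              entC := pvAdj (pvAdj s.entC op.1 (-1)) op.2.1 (-1),
              relC := pvAdj s.relC op.2.2.1 (-1),
              chE := PySem.Set.add (PySem.Set.add s.chE op.1) op.2.1,
              chR := PySem.Set.add s.chR op.2.2.1 } with hs'
          have hstep : pvStepB s op = s' := by
            simp only [pvStepB]
            rw [if_neg (by simpa using h1), if_pos h2]
          have happ : pvApplyOpA s.live op = PySem.Set.discard s.live t := by
            simp only [pvApplyOpA]
            rw [if_neg (by simpa using h1), if_pos h2, hrm]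
            simp [hl']
          have hok' : pvOkSnap s'.live rest = some lfin := by
            simp only [hs']
            rwa [← hl']
          have hnd' : s'.live.Nodup := by
            simp only [hs', hdiscard]
            exact hnd.erase t
          have hce' : pvCntE s'.entC s'.live := by
            intro e
            simp only [hs', hdiscard]
            rw [pvAdj_getD, pvAdj_getD, hce e, multE_erase e s.live t htm]
            have h1'' : t.1 = op.1 := rfl
            have h2'' : t.2.1 = op.2.1 := rfl
            rw [h1'', h2'']
            split_ifs <;> omega
          have hcr' : pvCntR s'.relC s'.live := by
            intro r
            simp only [hs', hdiscard]
            rw [pvAdj_getD, hcr r, multR_erase r s.live t htm]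
            have h1'' : t.2.2 = op.2.2.1 := rfl
            rw [h1'']
            split_ifs <;> omega
          rw [hstep, hfold, happ]
          have hres := ih s' lfin hok' hnd' hce' hcr'
          refine ⟨hres.1, hres.2.1, hres.2.2.1, hres.2.2.2.1, ?_, ?_⟩
          · intro e he
            obtain ⟨hnotch, hm⟩ := hres.2.2.2.2.1 e he
            simp only [hs', PySem.Set.mem_add] at hnotch
            refine ⟨fun hc => hnotch (Or.inl (Or.inl hc)), ?_⟩
            rw [hm]
            simp only [hs', hdiscard]
            rw [multE_erase e s.live t htm]
            have hh1 : ¬ (t.1 = e) := fun hh => hnotch (Or.inl (Or.inr hh.symm))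
            have hh2 : ¬ (t.2.1 = e) := fun hh => hnotch (Or.inr hh.symm)
            rw [if_neg hh1, if_neg hh2]
            ring
          · intro r hr
            obtain ⟨hnotch, hm⟩ := hres.2.2.2.2.2 r hr
            simp only [hs', PySem.Set.mem_add] at hnotch
            refine ⟨fun hc => hnotch (Or.inl hc), ?_⟩
            rw [hm]
            simp only [hs', hdiscard]
            rw [multR_erase r s.live t htm]
            have hh1 : ¬ (t.2.2 = r) := fun hh => hnotch (Or.inr hh.symm)
            rw [if_neg hh1]
            ring
      · -- other op type: no-op
        have hstep : pvStepB s op = s := by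
          simp only [pvStepB]
          rw [if_neg (by simpa using h1), if_neg (by simpa using h2)]
        have happ : pvApplyOpA s.live op = s.live := by
          simp only [pvApplyOpA]
          rw [if_neg (by simpa using h1), if_neg (by simpa using h2)]
        have hok' : pvOkSnap s.live rest = some lfin := by
          simp only [pvOkSnap] at hok
          rw [if_neg (by simpa using h1), if_neg (by simpa using h2)] at hok
          exact hok
        rw [hstep, hfold, happ]
        exact ih s lfin hok' hnd hce hcr

theorem exists_getD_cons {P : List pvTriple → Prop} (l : PySem.Set pvTriple)
    (ls : List (PySem.Set pvTriple)) :
    (∃ j : Nat, j < (l :: ls).length ∧ P ((l :: ls).getD j [])) ↔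
      P l ∨ ∃ j : Nat, j < ls.length ∧ P (ls.getD j []) := by
  constructor
  · rintro ⟨j, hj, hp⟩
    cases j with
    | zero => exact Or.inl (by simpa using hp)
    | succ m => exact Or.inr ⟨m, by simpa using hj, by simpa using hp⟩
  · rintro (hp | ⟨j, hj, hp⟩)
    · exact ⟨0, by simp, by simpa using hp⟩
    · exact ⟨j + 1, by simpa using hj, by simpa using hp⟩

-- B's outer loop
theorem outerB (eth rth : Int) (snaps : List (List pvOp)) : ∀ (g : BState),
    pvOkChain g.live snaps = true → g.live.Nodup →
    pvCntE g.entC g.live → pvCntR g.relC g.live →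
    pvSatE g.uncE g.live eth → pvSatR g.uncR g.live rth →
    (snaps.foldl (fun g ops => pvSnapshotB g ops eth rth) g).live = snaps.foldl snapLive g.live ∧
    (snaps.foldl (fun g ops => pvSnapshotB g ops eth rth) g).live.Nodup ∧
    pvCntE (snaps.foldl (fun g ops => pvSnapshotB g ops eth rth) g).entC
        ((snaps.foldl (fun g ops => pvSnapshotB g ops eth rth) g).live) ∧
    pvCntR (snaps.foldl (fun g ops => pvSnapshotB g ops eth rth) g).relC
        ((snaps.foldl (fun g ops => pvSnapshotB g ops eth rth) g).live) ∧
    pvSatE (snaps.foldl (fun g ops => pvSnapshotB g ops eth rth) g).uncE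
        ((snaps.foldl (fun g ops => pvSnapshotB g ops eth rth) g).live) eth ∧
    pvSatR (snaps.foldl (fun g ops => pvSnapshotB g ops eth rth) g).uncR
        ((snaps.foldl (fun g ops => pvSnapshotB g ops eth rth) g).live) rth ∧
    (∀ e, e ∈ (snaps.foldl (fun g ops => pvSnapshotB g ops eth rth) g).uncE ↔
        e ∈ g.uncE ∨ ∃ j : Nat, j < (livesFrom g.live snaps).length ∧
          0 < multE e ((livesFrom g.live snaps).getD j []) ∧
          multE e ((livesFrom g.live snaps).getD j []) < eth) ∧
    (∀ r, r ∈ (snaps.foldl (fun g ops => pvSnapshotB g ops eth rth) g).uncR ↔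
        r ∈ g.uncR ∨ ∃ j : Nat, j < (livesFrom g.live snaps).length ∧
          0 < multR r ((livesFrom g.live snaps).getD j []) ∧
          multR r ((livesFrom g.live snaps).getD j []) < rth) := by
  induction snaps with
  | nil =>
    intro g hchain hnd hce hcr hse hsr
    refine ⟨rfl, hnd, hce, hcr, hse, hsr, ?_, ?_⟩
    · intro e; simp [livesFrom]
    · intro r; simp [livesFrom]
  | cons ops rest ih =>
    intro g hchain hnd hce hcr hse hsr
    have hchain0 := hchain
    simp only [pvOkChain] at hchain0
    cases hsnap : pvOkSnap g.live ops with
    | none => rw [hsnap] at hchain0; exact absurd hchain0 (by simp)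
    | some l' =>
      rw [hsnap] at hchain0
      have hl' : l' = snapLive g.live ops := pvOkSnap_eq ops g.live l' hsnap
      subst hl'
      have hinner := innerB ops ⟨g.live, g.entC, g.relC, [], []⟩ (snapLive g.live ops)
        hsnap hnd hce hcr
      set sfin := ops.foldl pvStepB (⟨g.live, g.entC, g.relC, [], []⟩ : BSnapState) with hsfin
      set g' := pvSnapshotB g ops eth rth with hg'
      have hg'live : g'.live = snapLive g.live ops := hinner.1
      have hg'entC : g'.entC = sfin.entC := rfl
      have hg'relC : g'.relC = sfin.relC := rfl
      have hsflive : sfin.live = snapLive g.live ops := hinner.1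
      have hnd' : g'.live.Nodup := by rw [hg'live, ← hsflive]; exact hinner.2.1
      have hce' : pvCntE g'.entC g'.live := by
        rw [hg'entC, hg'live, ← hsflive]; exact hinner.2.2.1
      have hcr' : pvCntR g'.relC g'.live := by
        rw [hg'relC, hg'live, ← hsflive]; exact hinner.2.2.2.1
      have hmemE : ∀ e, e ∈ g'.uncE ↔ e ∈ g.uncE ∨
          (0 < multE e g'.live ∧ multE e g'.live < eth) := by
        intro e
        have hfold : e ∈ g'.uncE ↔ e ∈ g.uncE ∨ ∃ b ∈ sfin.chE,
            (0 < sfin.entC.getD b 0 && sfin.entC.getD b 0 < eth) = true ∧ e = b := by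
          exact mem_foldl_ite_add
            (fun b => 0 < sfin.entC.getD b 0 && sfin.entC.getD b 0 < eth)
            (fun b => b) sfin.chE g.uncE e
        rw [hfold]
        constructor
        · rintro (h | ⟨b, hb, hq, rfl⟩)
          · exact Or.inl h
          · right
            have : sfin.entC.getD e 0 = multE e g'.live := by
              rw [hg'entC, hg'live, ← hsflive] at *
              exact (by rw [hg'entC] at hce'; exact hce' e)
            rw [Bool.and_eq_true, decide_eq_true_eq, decide_eq_true_eq] at hq
            rw [this] at hq
            exact hq
        · rintro (h | hband)
          · exact Or.inl h
          · by_cases hch : e ∈ sfin.chE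
            · right
              refine ⟨e, hch, ?_, rfl⟩
              rw [Bool.and_eq_true, decide_eq_true_eq, decide_eq_true_eq]
              have : sfin.entC.getD e 0 = multE e g'.live := by
                rw [hg'entC] at hce'
                rw [hg'live, ← hsflive] at hband ⊢
                exact hce' e
              rw [this]
              exact hband
            · left
              obtain ⟨_, hm⟩ := hinner.2.2.2.2.1 e hch
              rw [hg'live, ← hsflive] at hband
              rw [hm] at hband
              exact hse e hband.1 hband.2
      have hmemR : ∀ r, r ∈ g'.uncR ↔ r ∈ g.uncR ∨
          (0 < multR r g'.live ∧ multR r g'.live < rth) := by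
        intro r
        have hfold : r ∈ g'.uncR ↔ r ∈ g.uncR ∨ ∃ b ∈ sfin.chR,
            (0 < sfin.relC.getD b 0 && sfin.relC.getD b 0 < rth) = true ∧ r = b := by
          exact mem_foldl_ite_add
            (fun b => 0 < sfin.relC.getD b 0 && sfin.relC.getD b 0 < rth)
            (fun b => b) sfin.chR g.uncR r
        rw [hfold]
        constructor
        · rintro (h | ⟨b, hb, hq, rfl⟩)
          · exact Or.inl h
          · right
            have : sfin.relC.getD r 0 = multR r g'.live := by
              rw [hg'relC] at hcr'
              rw [hg'live, ← hsflive]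
              rw [hg'live, ← hsflive] at hcr'
              exact hcr' r
            rw [Bool.and_eq_true, decide_eq_true_eq, decide_eq_true_eq] at hq
            rw [this] at hq
            exact hq
        · rintro (h | hband)
          · exact Or.inl h
          · by_cases hch : r ∈ sfin.chR
            · right
              refine ⟨r, hch, ?_, rfl⟩
              rw [Bool.and_eq_true, decide_eq_true_eq, decide_eq_true_eq]
              have : sfin.relC.getD r 0 = multR r g'.live := by
                rw [hg'relC] at hcr'
                rw [hg'live, ← hsflive] at hband ⊢
                exact hcr' r
              rw [this]
              exact hband
            · left
              obtain ⟨_, hm⟩ := hinner.2.2.2.2.2 r hch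
              rw [hg'live, ← hsflive] at hband
              rw [hm] at hband
              exact hsr r hband.1 hband.2
      have hse' : pvSatE g'.uncE g'.live eth := by
        intro e h1 h2
        exact (hmemE e).mpr (Or.inr ⟨h1, h2⟩)
      have hsr' : pvSatR g'.uncR g'.live rth := by
        intro r h1 h2
        exact (hmemR r).mpr (Or.inr ⟨h1, h2⟩)
      have hchain' : pvOkChain g'.live rest = true := by
        rw [hg'live]; exact hchain0
      have IH := ih g' hchain' hnd' hce' hcr' hse' hsr'
      rw [List.foldl_cons]
      have hLs : livesFrom g.live (ops :: rest)
          = snapLive g.live ops :: livesFrom (snapLive g.live ops) rest := rfl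
      refine ⟨?_, IH.2.1, IH.2.2.1, IH.2.2.2.1, IH.2.2.2.2.1, IH.2.2.2.2.2.1, ?_, ?_⟩
      · rw [IH.1, hg'live]
        rfl
      · intro e
        rw [IH.2.2.2.2.2.2.1 e, hmemE e, hLs, hg'live,
          exists_getD_cons (P := fun L => 0 < multE e L ∧ multE e L < eth)]
        tauto
      · intro r
        rw [IH.2.2.2.2.2.2.2 r, hmemR r, hLs, hg'live,
          exists_getD_cons (P := fun L => 0 < multR r L ∧ multR r L < rth)]
        tauto

def pvGB (tod : List (List pvOp)) (eth rth : Int) : BState :=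
  tod.foldl (fun g ops => pvSnapshotB g ops eth rth) ⟨[], PySem.Dict.empty, PySem.Dict.empty, [], []⟩

theorem portB_eq (tod : List (List pvOp)) (num eth rth : Int) :
    remove_uncommon_triple_ops_alt tod num eth rth = tod.map (fun ops =>
      ops.filter (fun op =>
        !((pvGB tod eth rth).uncE.contains op.1) && !((pvGB tod eth rth).uncE.contains op.2.1)
          && !((pvGB tod eth rth).uncR.contains op.2.2.1))) := rfl

theorem contains_eq_of_mem_iff (u v : PySem.Set Int) (h : ∀ x, x ∈ u ↔ x ∈ v) (x : Int) :
    u.contains x = v.contains x := by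
  by_cases hu : x ∈ u
  · rw [show u.contains x = true from (PySem.Set.contains_iff u x).mpr hu,
        show v.contains x = true from (PySem.Set.contains_iff v x).mpr ((h x).mp hu)]
  · have hv : x ∉ v := fun hx => hu ((h x).mpr hx)
    have h1 : u.contains x = false := by
      rw [← Bool.not_eq_true, PySem.Set.contains_iff]; exact hu
    have h2 : v.contains x = false := by
      rw [← Bool.not_eq_true, PySem.Set.contains_iff]; exact hv
    rw [h1, h2]


-- ===== VERDICT (by name: the statement is the Claim_ definition above) =====
theorem remove_uncommon_triple_ops_spec : Claim_equal_remove_uncommon_triple_ops := by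
  intro tod num eth rth _hdom hpre
  unfold Spec_remove_uncommon_triple_ops
  have hok : pvOk [] tod 0 num = true := hpre
  have hchain := pvOk_imp_chain tod [] 0 num hok
  have hB := outerB eth rth tod ⟨[], PySem.Dict.empty, PySem.Dict.empty, [], []⟩ hchain
    (by simp) (by intro e; simp [multE, PySem.Dict.getD_empty]) (by intro r; simp [multR, PySem.Dict.getD_empty])
    (by intro e h1 h2; simp [multE] at h1) (by intro r h1 h2; simp [multR] at h1)
  have hBE := hB.2.2.2.2.2.2.1
  have hBR := hB.2.2.2.2.2.2.2
  have hBE' : ∀ x, x ∈ (pvGB tod eth rth).uncE ↔ (∃ j : Nat, j < (livesFrom [] tod).length ∧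
      0 < multE x ((livesFrom [] tod).getD j []) ∧ multE x ((livesFrom [] tod).getD j []) < eth) := by
    intro x; have := hBE x; simpa [pvGB] using this
  have hBR' : ∀ x, x ∈ (pvGB tod eth rth).uncR ↔ (∃ j : Nat, j < (livesFrom [] tod).length ∧
      0 < multR x ((livesFrom [] tod).getD j []) ∧ multR x ((livesFrom [] tod).getD j []) < rth) := by
    intro x; have := hBR x; simpa [pvGB] using this
  have hE : ∀ x, x ∈ pvUncE tod num eth ↔ x ∈ (pvGB tod eth rth).uncE := by
    intro x
    rw [uncA_ent_iff tod num eth hok x, hBE' x]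
  have hR : ∀ x, x ∈ pvUncR tod num rth ↔ x ∈ (pvGB tod eth rth).uncR := by
    intro x
    rw [uncA_rel_iff tod num rth hok x, hBR' x]
  rw [portA_eq, portB_eq]
  apply List.map_congr_left
  intro ops _
  have hfold := PySem.List.foldl_append_if
      (fun op : pvOp => !((pvUncE tod num eth).contains op.1) && !((pvUncE tod num eth).contains op.2.1)
            && !((pvUncR tod num rth).contains op.2.2.1)) id ops []
  simp only [id_eq, List.map_id, List.nil_append] at hfold
  rw [hfold]
  apply List.filter_congr
  intro op _
  rw [contains_eq_of_mem_iff _ _ hE, contains_eq_of_mem_iff _ _ hE, contains_eq_of_mem_iff _ _ hR]
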